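-- pv_equiv track=rewrite | github.com/Crim5on/VaultBot | src/VaultBot.py | get_answer_from_keyword
-- ===== SOURCE A (Python) =====
-- def clean_word(word: str) -> str:
--     clean_word = ''.join(filter(str.isalnum, word))       # remove non-alphanumeric chars
--     clean_word = clean_word.lower()
--     return clean_word
--
-- def get_answer_from_keyword(dictionary: dict, sentence: str) -> str:
--     words = sentence.split()
--     words = reversed(words)
--     for word in words:
--         answer = dictionary.get(clean_word(word), None)
--         if answer is not None:
--             return answer
--     return None
-- ===== SOURCE B (Python) =====
-- def clean_word(word: str) -> str:
--     clean_word = ''.join(filter(str.isalnum, word))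
--     clean_word = clean_word.lower()
--     return clean_word
--
-- def get_answer_from_keyword(dictionary: dict, sentence: str) -> str:
--     result = None
--     for word in sentence.split():
--         answer = dictionary.get(clean_word(word), None)
--         if answer is not None:
--             result = answer
--     return result
-- ===== Notes on version B (the rewrite author's own statement) =====
-- stated objective: simpler
-- what changed: A reverses the word list and returns at the first match; B scans forward once with an overwriting accumulator (no reversal, no early return) and returns the last match.
import Mathlib
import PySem

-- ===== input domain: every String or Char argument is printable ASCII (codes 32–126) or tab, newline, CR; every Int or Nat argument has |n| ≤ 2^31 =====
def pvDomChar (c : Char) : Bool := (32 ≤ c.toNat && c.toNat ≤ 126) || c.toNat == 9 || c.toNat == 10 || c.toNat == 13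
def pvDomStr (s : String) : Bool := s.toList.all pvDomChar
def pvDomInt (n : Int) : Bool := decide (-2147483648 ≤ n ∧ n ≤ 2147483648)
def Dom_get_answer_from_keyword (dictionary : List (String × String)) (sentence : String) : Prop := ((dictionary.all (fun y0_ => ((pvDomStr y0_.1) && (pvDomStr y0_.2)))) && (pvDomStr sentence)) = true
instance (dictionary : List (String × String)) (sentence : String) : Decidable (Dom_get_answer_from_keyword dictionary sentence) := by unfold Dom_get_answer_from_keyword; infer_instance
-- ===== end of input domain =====

-- B replaces A's reverse-then-first-match loop by a single forward scan with an
-- overwriting accumulator (objective: simpler; same result, no reversal pass).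

-- ===== PORT A =====
-- shared helper clean_word: ''.join(filter(str.isalnum, word)).lower()
def clean_word (word : String) : String :=
  PySem.Str.lower (String.ofList (word.toList.filter PySem.Chars.isalnum))

-- the 'for word in reversed(words): … return answer' loop, as first-match recursion
def pvGoA (dictionary : List (String × String)) : List String → Option String
  | [] => none
  | w :: ws =>
    match PySem.Dict.get? (PySem.Dict.mk dictionary) (clean_word w) with
    | some answer => some answer
    | none => pvGoA dictionary ws

def get_answer_from_keyword (dictionary : List (String × String)) (sentence : String) : Option String :=
  pvGoA dictionary (PySem.Str.split₀ sentence).reverse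

-- ===== PORT B =====
def get_answer_from_keyword_alt (dictionary : List (String × String)) (sentence : String) : Option String :=
  (PySem.Str.split₀ sentence).foldl
    (fun result word =>
      match PySem.Dict.get? (PySem.Dict.mk dictionary) (clean_word word) with
      | some answer => some answer
      | none => result)
    none

-- ===== PRECONDITION & SPEC =====
def Spec_get_answer_from_keyword (dictionary : List (String × String)) (sentence : String) (out : Option String) : Prop := out = get_answer_from_keyword_alt dictionary sentence
instance (dictionary : List (String × String)) (sentence : String) (out : Option String) : Decidable (Spec_get_answer_from_keyword dictionary sentence out) := by unfold Spec_get_answer_from_keyword; infer_instance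

-- ===== CLAIM (what is proved, stated in full; the proofs are below) =====
def Claim_equal_get_answer_from_keyword : Prop := ∀ (dictionary : List (String × String)) (sentence : String), Dom_get_answer_from_keyword dictionary sentence → Spec_get_answer_from_keyword dictionary sentence (get_answer_from_keyword dictionary sentence)

-- ===== LEMMAS AND PROOFS =====
theorem pvGoA_append (d : List (String × String)) (xs ys : List String) :
    pvGoA d (xs ++ ys) = (pvGoA d xs).or (pvGoA d ys) := by
  induction xs with
  | nil => simp [pvGoA]
  | cons w ws ih =>
    simp only [List.cons_append, pvGoA]
    cases PySem.Dict.get? (PySem.Dict.mk d) (clean_word w) <;> simp [ih]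

theorem pvFoldl_eq (d : List (String × String)) (ws : List String) (acc : Option String) :
    ws.foldl
      (fun result word =>
        match PySem.Dict.get? (PySem.Dict.mk d) (clean_word word) with
        | some answer => some answer
        | none => result)
      acc = (pvGoA d ws.reverse).or acc := by
  induction ws generalizing acc with
  | nil => simp [pvGoA]
  | cons w ws ih =>
    simp only [List.foldl_cons, List.reverse_cons, pvGoA_append, ih]
    cases h : pvGoA d ws.reverse <;>
      cases h2 : PySem.Dict.get? (PySem.Dict.mk d) (clean_word w) <;>
      simp [pvGoA, h2, Option.or]

-- ===== VERDICT (by name: the statement is the Claim_ definition above) =====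
theorem get_answer_from_keyword_spec : Claim_equal_get_answer_from_keyword := by
  intro d s _
  unfold Spec_get_answer_from_keyword get_answer_from_keyword get_answer_from_keyword_alt
  rw [pvFoldl_eq]
  cases pvGoA d (PySem.Str.split₀ s).reverse <;> rfl
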